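-- pv_equiv track=rewrite | github.com/rkabirs/cxr-combined-pipeline | cxr-blind/src/radgraph_utils.py | compute_deviation
-- ===== SOURCE A (Python) =====
-- def compute_deviation(top_neighbors_idx: list[int],
--                       target_entities: set,
--                       train_ground_truth_entities: list[frozenset[str]]) -> tuple[int, int, int]:
--     """
--     Compute specific deviation values for a sequence of neighbor indices
--     against the test image's targets.
--     Creates a visual consensus: entity must exist in at least min(2, len/2)
--     neighbors, and calculates what is missing and what is unsupported.
--     """
--     if len(top_neighbors_idx) == 0:
--         return 0, 0, 0
--
--     neighbor_entity_sets = [train_ground_truth_entities[idx] for idx in top_neighbors_idx]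
--
--     from collections import Counter
--     all_ents = []
--     for subset in neighbor_entity_sets:
--         all_ents.extend(list(subset))
--
--     entity_counts = Counter(all_ents)
--     consensus_threshold = 2 if len(top_neighbors_idx) >= 2 else 1
--     consensus_entities = {
--         ent for ent, count in entity_counts.items()
--         if count >= consensus_threshold
--     }
--
--     unsupported_entities = target_entities - consensus_entities
--     missing_entities = consensus_entities - target_entities
--     return (
--         len(unsupported_entities) + len(missing_entities), # total deviation score
--         len(unsupported_entities),
--         len(missing_entities),
--     )
-- ===== SOURCE B (Python) =====
-- def compute_deviation(top_neighbors_idx: list[int],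
--                       target_entities: set,
--                       train_ground_truth_entities: list[frozenset[str]]) -> tuple[int, int, int]:
--     if not top_neighbors_idx:
--         return 0, 0, 0
--
--     neighbor_entity_sets = [train_ground_truth_entities[idx] for idx in top_neighbors_idx]
--
--     # Incremental two-set scan: no Counter, no per-entity count kept.
--     seen_once: set = set()
--     consensus: set = set()
--     for subset in neighbor_entity_sets:
--         for ent in subset:
--             if ent in consensus:
--                 continue
--             if ent in seen_once:
--                 seen_once.discard(ent)
--                 consensus.add(ent)
--             else:
--                 seen_once.add(ent)
--
--     if len(top_neighbors_idx) < 2: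
--         # single neighbor: threshold is 1, so everything seen once counts
--         consensus |= seen_once
--
--     unsupported = len(target_entities - consensus)
--     missing = len(consensus - target_entities)
--     return unsupported + missing, unsupported, missing
-- ===== Notes on version B (the rewrite author's own statement) =====
-- stated objective: alternative
-- what changed: Replaces the build-a-list-of-all-entities + Counter + threshold-filter pipeline with a single incremental scan that maintains two sets (seen_once, consensus), promoting an entity to consensus on its second sighting, with the single-neighbor threshold-1 case handled by merging seen_once into consensus.
import Mathlib
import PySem

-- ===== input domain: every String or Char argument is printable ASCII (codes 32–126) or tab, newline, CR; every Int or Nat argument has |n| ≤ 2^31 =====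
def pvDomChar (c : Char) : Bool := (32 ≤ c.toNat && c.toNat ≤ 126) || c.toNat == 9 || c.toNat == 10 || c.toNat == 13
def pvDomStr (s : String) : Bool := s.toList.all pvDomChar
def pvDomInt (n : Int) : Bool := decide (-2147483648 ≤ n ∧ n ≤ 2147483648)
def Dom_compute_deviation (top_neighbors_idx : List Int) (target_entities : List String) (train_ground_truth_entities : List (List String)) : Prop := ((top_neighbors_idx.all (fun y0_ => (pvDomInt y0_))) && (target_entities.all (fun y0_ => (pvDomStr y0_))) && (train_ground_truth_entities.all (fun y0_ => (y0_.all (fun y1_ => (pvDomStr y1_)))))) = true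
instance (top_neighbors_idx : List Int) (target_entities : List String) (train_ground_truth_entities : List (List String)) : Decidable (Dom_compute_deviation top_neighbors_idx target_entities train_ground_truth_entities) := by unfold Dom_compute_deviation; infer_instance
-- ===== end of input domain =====

-- B replaces A's build-all-entities + Counter + threshold-filter consensus with a single
-- incremental two-set scan (seen_once/consensus, promote on second sighting); same triple proved.

-- ===== PORT A =====
def compute_deviation (top_neighbors_idx : List Int) (target_entities : List String) (train_ground_truth_entities : List (List String)) : Int × Int × Int :=
  if top_neighbors_idx.length = 0 then (0, 0, 0)
  else
    match top_neighbors_idx.mapM (fun idx => PySem.List.pyGet? train_ground_truth_entities idx) with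
    | none => (0, 0, 0)  -- IndexError in Python; these inputs are excluded by Pre_
    | some neighbor_entity_sets =>
      let all_ents : List String := neighbor_entity_sets.foldl (fun acc subset => acc ++ subset) []
      let entity_counts : PySem.Dict String Int := PySem.Dict.counter all_ents
      let consensus_threshold : Int := if 2 ≤ top_neighbors_idx.length then 2 else 1
      let consensus_entities : PySem.Set String :=
        PySem.Set.ofList ((entity_counts.items.filter (fun p => decide (consensus_threshold ≤ p.2))).map (·.1))
      let target_set : PySem.Set String := PySem.Set.ofList target_entities
      let unsupported_entities := PySem.Set.diff target_set consensus_entities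
      let missing_entities := PySem.Set.diff consensus_entities target_set
      (PySem.Set.len unsupported_entities + PySem.Set.len missing_entities,
       PySem.Set.len unsupported_entities,
       PySem.Set.len missing_entities)

-- ===== PORT B =====
-- one entity step of B's scan: skip if already consensus, promote on second sighting, else remember
def cd_step (st : PySem.Set String × PySem.Set String) (ent : String) : PySem.Set String × PySem.Set String :=
  if PySem.Set.contains st.2 ent then st
  else if PySem.Set.contains st.1 ent then (PySem.Set.discard st.1 ent, PySem.Set.add st.2 ent)
  else (PySem.Set.add st.1 ent, st.2)

def compute_deviation_alt (top_neighbors_idx : List Int) (target_entities : List String) (train_ground_truth_entities : List (List String)) : Int × Int × Int :=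
  if top_neighbors_idx.length = 0 then (0, 0, 0)
  else
    match top_neighbors_idx.mapM (fun idx => PySem.List.pyGet? train_ground_truth_entities idx) with
    | none => (0, 0, 0)  -- IndexError in Python; these inputs are excluded by Pre_
    | some neighbor_entity_sets =>
      let st := neighbor_entity_sets.foldl (fun st subset => subset.foldl cd_step st)
                  ((PySem.Set.empty : PySem.Set String), (PySem.Set.empty : PySem.Set String))
      let consensus : PySem.Set String :=
        if top_neighbors_idx.length < 2 then PySem.Set.union st.2 st.1 else st.2
      let target_set : PySem.Set String := PySem.Set.ofList target_entities
      let unsupported := PySem.Set.diff target_set consensus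
      let missing := PySem.Set.diff consensus target_set
      (PySem.Set.len unsupported + PySem.Set.len missing,
       PySem.Set.len unsupported,
       PySem.Set.len missing)

-- ===== PRECONDITION & SPEC =====
-- Pre_ excludes exactly the inputs where Python A raises IndexError: some neighbor index out of range.
def Pre_compute_deviation (top_neighbors_idx : List Int) (target_entities : List String) (train_ground_truth_entities : List (List String)) : Prop :=
  ∀ i ∈ top_neighbors_idx, PySem.Raise.InRange train_ground_truth_entities.length i
instance (top_neighbors_idx : List Int) (target_entities : List String) (train_ground_truth_entities : List (List String)) : Decidable (Pre_compute_deviation top_neighbors_idx target_entities train_ground_truth_entities) := by unfold Pre_compute_deviation; infer_instance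

def pvWitness_compute_deviation : List Int × List String × List (List String) :=
  ([0, 1, -1], ["a", "c"], [["a", "b"], ["b", "c"]])

def Spec_compute_deviation (top_neighbors_idx : List Int) (target_entities : List String) (train_ground_truth_entities : List (List String)) (out : Int × Int × Int) : Prop := out = compute_deviation_alt top_neighbors_idx target_entities train_ground_truth_entities
instance (top_neighbors_idx : List Int) (target_entities : List String) (train_ground_truth_entities : List (List String)) (out : Int × Int × Int) : Decidable (Spec_compute_deviation top_neighbors_idx target_entities train_ground_truth_entities out) := by unfold Spec_compute_deviation; infer_instance

-- ===== CLAIM (what is proved, stated in full; the proofs are below) =====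
def Claim_equal_compute_deviation : Prop := ∀ (top_neighbors_idx : List Int) (target_entities : List String) (train_ground_truth_entities : List (List String)), Dom_compute_deviation top_neighbors_idx target_entities train_ground_truth_entities → Pre_compute_deviation top_neighbors_idx target_entities train_ground_truth_entities → Spec_compute_deviation top_neighbors_idx target_entities train_ground_truth_entities (compute_deviation top_neighbors_idx target_entities train_ground_truth_entities)

-- ===== LEMMAS AND PROOFS =====

-- A's accumulation loop concatenates the subsets: it is flatten.
lemma foldl_append_eq_flatten (l : List (List String)) (a : List String) :
    l.foldl (fun acc subset => acc ++ subset) a = a ++ l.flatten := by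
  induction l generalizing a with
  | nil => simp
  | cons s t ih => simp [ih, List.append_assoc]

-- Invariant of B's scan over any entity stream, from any well-formed (seen, cons) state.
lemma cd_inv (es : List String) (seen cons : PySem.Set String)
    (hs : seen.Nodup) (hc : cons.Nodup) (hd : ∀ x ∈ seen, x ∉ cons) :
    (es.foldl cd_step (seen, cons)).1.Nodup ∧ (es.foldl cd_step (seen, cons)).2.Nodup ∧
    (∀ x : String,
      (x ∈ (es.foldl cd_step (seen, cons)).2 ↔
        x ∈ cons ∨ (x ∈ seen ∧ 1 ≤ es.count x) ∨ (x ∉ seen ∧ x ∉ cons ∧ 2 ≤ es.count x)) ∧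
      (x ∈ (es.foldl cd_step (seen, cons)).1 ↔
        x ∉ (es.foldl cd_step (seen, cons)).2 ∧ (x ∈ seen ∨ 1 ≤ es.count x))) := by
  induction es generalizing seen cons with
  | nil =>
    refine ⟨hs, hc, fun x => ⟨by simp, ?_⟩⟩
    simp only [List.foldl_nil, List.count_nil]
    constructor
    · intro h; exact ⟨fun hcon => hd x h hcon, Or.inl h⟩
    · rintro ⟨-, h | h⟩
      · exact h
      · omega
  | cons e rest ih =>
    simp only [List.foldl_cons]
    by_cases he2 : e ∈ cons
    · have hb2 : PySem.Set.contains cons e = true := (PySem.Set.contains_iff _ _).mpr he2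
      simp only [cd_step, hb2, if_true]
      obtain ⟨n1, n2, hch⟩ := ih seen cons hs hc hd
      refine ⟨n1, n2, fun x => ?_⟩
      obtain ⟨hx2, hx1⟩ := hch x
      by_cases hxe : x = e
      · subst hxe
        have hr2 : x ∈ (rest.foldl cd_step (seen, cons)).2 := hx2.mpr (Or.inl he2)
        constructor
        · rw [hx2]
          exact ⟨fun _ => Or.inl he2, fun _ => Or.inl he2⟩
        · rw [hx1]
          simp [hr2]
      · constructor
        · rw [hx2, List.count_cons]
          have hex : ¬ e = x := fun h => hxe h.symm
          simp [hxe, hex]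
        · rw [hx1, List.count_cons]
          have hex : ¬ e = x := fun h => hxe h.symm
          simp [hxe, hex]
    · have hb2 : PySem.Set.contains cons e = false :=
        Bool.eq_false_iff.mpr (fun h => he2 ((PySem.Set.contains_iff _ _).mp h))
      by_cases he1 : e ∈ seen
      · have hb1 : PySem.Set.contains seen e = true := (PySem.Set.contains_iff _ _).mpr he1
        simp only [cd_step, hb2, hb1, if_true, Bool.false_eq_true, if_false]
        have hs' : (PySem.Set.discard seen e).Nodup := PySem.Set.nodup_discard _ _ hs
        have hc' : (PySem.Set.add cons e).Nodup := PySem.Set.nodup_add _ _ hc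
        have hd' : ∀ x ∈ PySem.Set.discard seen e, x ∉ PySem.Set.add cons e := by
          intro x hx hxc
          rw [PySem.Set.mem_discard] at hx
          rw [PySem.Set.mem_add] at hxc
          rcases hxc with h | h
          · exact hd x hx.1 h
          · exact hx.2 h
        obtain ⟨n1, n2, hch⟩ := ih (PySem.Set.discard seen e) (PySem.Set.add cons e) hs' hc' hd'
        refine ⟨n1, n2, fun x => ?_⟩
        obtain ⟨hx2, hx1⟩ := hch x
        rw [PySem.Set.mem_discard, PySem.Set.mem_add] at hx2
        rw [PySem.Set.mem_discard] at hx1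
        by_cases hxe : x = e
        · subst hxe
          have hr2 : x ∈ (rest.foldl cd_step (PySem.Set.discard seen x, PySem.Set.add cons x)).2 :=
            hx2.mpr (Or.inl (Or.inr rfl))
          constructor
          · rw [hx2]
            refine ⟨fun _ => Or.inr (Or.inl ⟨he1, ?_⟩), fun _ => Or.inl (Or.inr rfl)⟩
            rw [List.count_cons]
            simp
          · rw [hx1]
            simp [hr2]
        · constructor
          · rw [hx2, List.count_cons]
            have hex : ¬ e = x := fun h => hxe h.symm
            simp [hxe, hex]
          · rw [hx1, List.count_cons]
            have hex : ¬ e = x := fun h => hxe h.symm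
            simp [hxe, hex]
      · have hb1 : PySem.Set.contains seen e = false :=
          Bool.eq_false_iff.mpr (fun h => he1 ((PySem.Set.contains_iff _ _).mp h))
        simp only [cd_step, hb2, hb1, Bool.false_eq_true, if_false]
        have hs' : (PySem.Set.add seen e).Nodup := PySem.Set.nodup_add _ _ hs
        have hd' : ∀ x ∈ PySem.Set.add seen e, x ∉ cons := by
          intro x hx hxc
          rw [PySem.Set.mem_add] at hx
          rcases hx with h | h
          · exact hd x h hxc
          · exact he2 (h ▸ hxc)
        obtain ⟨n1, n2, hch⟩ := ih (PySem.Set.add seen e) cons hs' hc hd'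
        refine ⟨n1, n2, fun x => ?_⟩
        obtain ⟨hx2, hx1⟩ := hch x
        rw [PySem.Set.mem_add] at hx2
        rw [PySem.Set.mem_add] at hx1
        by_cases hxe : x = e
        · subst hxe
          constructor
          · rw [hx2, List.count_cons]
            simp [he1, he2]
          · rw [hx1, hx2, List.count_cons]
            simp [he1, he2]
        · constructor
          · rw [hx2, List.count_cons]
            have hex : ¬ e = x := fun h => hxe h.symm
            simp [hxe, hex]
          · rw [hx1, List.count_cons]
            have hex : ¬ e = x := fun h => hxe h.symm
            simp [hxe, hex]

-- Membership in A's consensus set: exactly "count reaches the threshold" (for a positive threshold).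
lemma memA (es : List String) (thr : Int) (h1 : 1 ≤ thr) (x : String) :
    x ∈ PySem.Set.ofList (((PySem.Dict.counter es).items.filter (fun p => decide (thr ≤ p.2))).map (·.1)) ↔
      thr ≤ (es.count x : Int) := by
  rw [PySem.Dict.items_counter]
  simp only [PySem.Set.mem_ofList, List.mem_map, List.mem_filter]
  constructor
  · rintro ⟨p, ⟨⟨k, hk, rfl⟩, hp⟩, rfl⟩
    simpa using hp
  · intro h
    refine ⟨(x, (es.count x : Int)), ⟨⟨x, ?_, rfl⟩, by simpa using h⟩, rfl⟩
    have hc : 0 < es.count x := by omega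
    have := List.count_pos_iff.mp hc
    simpa [PySem.Set.mem_ofList] using this

-- Two nodup lists with the same members have set-differences of the same length.
lemma len_diff_eq (c₁ c₂ t : PySem.Set String) (h₁ : c₁.Nodup) (h₂ : c₂.Nodup)
    (hm : ∀ x, x ∈ c₁ ↔ x ∈ c₂) :
    PySem.Set.len (PySem.Set.diff c₁ t) = PySem.Set.len (PySem.Set.diff c₂ t) := by
  have hperm : (PySem.Set.diff c₁ t).Perm (PySem.Set.diff c₂ t) := by
    rw [List.perm_ext_iff_of_nodup (PySem.Set.nodup_diff _ _ h₁) (PySem.Set.nodup_diff _ _ h₂)]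
    intro a
    simp [PySem.Set.mem_diff, hm a]
  simp [PySem.Set.len, hperm.length_eq]

lemma diff_congr_right (t c₁ c₂ : PySem.Set String) (hm : ∀ x, x ∈ c₁ ↔ x ∈ c₂) :
    PySem.Set.diff t c₁ = PySem.Set.diff t c₂ := by
  unfold PySem.Set.diff
  refine List.filter_congr ?_
  intro x _
  have := hm x
  by_cases h : x ∈ c₂ <;> simp_all

-- ===== VERDICT (by name: the statement is the Claim_ definition above) =====
theorem compute_deviation_spec : Claim_equal_compute_deviation := by
  intro idxs tgt train _ _
  unfold Spec_compute_deviation compute_deviation compute_deviation_alt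
  by_cases h0 : idxs.length = 0
  · simp [h0]
  · simp only [h0, if_false]
    cases hm : idxs.mapM (fun idx => PySem.List.pyGet? train idx) with
    | none => rfl
    | some sets =>
      -- the flattened entity stream
      have hflat : sets.foldl (fun acc subset => acc ++ subset) ([] : List String) = sets.flatten := by
        simpa using foldl_append_eq_flatten sets []
      have hnest : sets.foldl (fun st subset => subset.foldl cd_step st)
          ((PySem.Set.empty : PySem.Set String), (PySem.Set.empty : PySem.Set String))
          = sets.flatten.foldl cd_step (PySem.Set.empty, PySem.Set.empty) :=
        List.foldl_flatten.symm
      simp only [hflat, hnest]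
      set es : List String := sets.flatten with hes
      obtain ⟨hn1, hn2, hchar⟩ :=
        cd_inv es PySem.Set.empty PySem.Set.empty List.nodup_nil List.nodup_nil (by simp [PySem.Set.empty])
      set st := es.foldl cd_step ((PySem.Set.empty : PySem.Set String), (PySem.Set.empty : PySem.Set String)) with hst
      set thr : Int := if 2 ≤ idxs.length then 2 else 1 with hthr
      set consB : PySem.Set String :=
        if idxs.length < 2 then PySem.Set.union st.2 st.1 else st.2 with hconsB
      set consA : PySem.Set String :=
        PySem.Set.ofList (((PySem.Dict.counter es).items.filter (fun p => decide (thr ≤ p.2))).map (·.1)) with hconsA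
      have hBnodup : consB.Nodup := by
        rw [hconsB]; split
        · exact PySem.Set.nodup_union _ _ hn2
        · exact hn2
      have hAnodup : consA.Nodup := by rw [hconsA]; exact PySem.Set.nodup_ofList _
      have hthr1 : 1 ≤ thr := by rw [hthr]; split <;> norm_num
      have hmem : ∀ x, x ∈ consA ↔ x ∈ consB := by
        intro x
        rw [hconsA, memA es thr hthr1 x, hconsB]
        obtain ⟨h2, h1⟩ := hchar x
        simp only [PySem.Set.empty, List.not_mem_nil, false_and, and_false, or_false, false_or,
          not_false_iff, true_and] at h2 h1
        by_cases hlen : 2 ≤ idxs.length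
        · have hnl : ¬ idxs.length < 2 := by omega
          simp only [hnl, if_false, hthr, hlen, if_true]
          rw [h2]; omega
        · have hl1 : idxs.length < 2 := by omega
          simp only [hl1, if_true, hthr, hlen, if_false, PySem.Set.mem_union]
          rw [h2, h1, h2]; omega
      -- finish: the two diffs agree in length
      rw [diff_congr_right (PySem.Set.ofList tgt) consA consB hmem,
        len_diff_eq consA consB (PySem.Set.ofList tgt) hAnodup hBnodup hmem]
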